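-- pv_equiv track=rewrite | github.com/nabil-rady/Kenken-Solver | kenken.py | constraints
-- ===== SOURCE A (Python) =====
-- def row_or_col_same(cell_1, cell_2):
--     x1, y1 = cell_1
--     x2, y2 = cell_2
--
--     same_row = x1 == x2
--     same_col = y1 == y2
--
--     return same_row or same_col
--
-- def constraints(cage_1, values_of_cage_1, cage_2, values_of_cage_2):
--     if cage_1 == cage_2:
--         return True
--     for cell_1, value_in_cage_1 in zip(cage_1, values_of_cage_1):
--         for cell_2, value_in_cage_2 in zip(cage_2,  values_of_cage_2):
--             if row_or_col_same(cell_1, cell_2) and value_in_cage_1 == value_in_cage_2: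
--                 return False
--     return True
-- ===== SOURCE B (Python) =====
-- def constraints(cage_1, values_of_cage_1, cage_2, values_of_cage_2):
--     if cage_1 == cage_2:
--         return True
--     keys_1 = set()
--     for (x, y), v in zip(cage_1, values_of_cage_1):
--         keys_1.add(('r', x, v))
--         keys_1.add(('c', y, v))
--     keys_2 = set()
--     for (x, y), v in zip(cage_2, values_of_cage_2):
--         keys_2.add(('r', x, v))
--         keys_2.add(('c', y, v))
--     return keys_1.isdisjoint(keys_2)
-- ===== Notes on version B (the rewrite author's own statement) =====
-- stated objective: faster
-- what changed: Replaced the nested O(n*m) pairwise scan with two tagged key sets ((row,value) and (col,value) keys built in one pass per cage) whose disjointness decides the constraint.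
import Mathlib
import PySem

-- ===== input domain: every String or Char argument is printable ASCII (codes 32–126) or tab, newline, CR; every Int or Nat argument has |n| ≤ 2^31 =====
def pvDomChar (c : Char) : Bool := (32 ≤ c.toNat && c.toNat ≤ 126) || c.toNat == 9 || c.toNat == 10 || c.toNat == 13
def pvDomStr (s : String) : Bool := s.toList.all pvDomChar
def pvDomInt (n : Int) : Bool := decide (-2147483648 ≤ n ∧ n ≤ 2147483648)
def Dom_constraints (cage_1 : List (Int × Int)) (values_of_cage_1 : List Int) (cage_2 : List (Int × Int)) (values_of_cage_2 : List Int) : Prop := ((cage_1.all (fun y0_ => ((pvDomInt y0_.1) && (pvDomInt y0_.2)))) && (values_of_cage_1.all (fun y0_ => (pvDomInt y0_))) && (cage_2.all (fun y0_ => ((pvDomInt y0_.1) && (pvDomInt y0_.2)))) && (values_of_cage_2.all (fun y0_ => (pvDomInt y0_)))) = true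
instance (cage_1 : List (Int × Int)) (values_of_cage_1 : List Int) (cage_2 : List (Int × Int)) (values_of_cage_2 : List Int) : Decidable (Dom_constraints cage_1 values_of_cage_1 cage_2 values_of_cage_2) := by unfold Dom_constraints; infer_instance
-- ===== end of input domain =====

-- ===== PORT A =====
def rowOrColSame (cell_1 cell_2 : Int × Int) : Bool :=
  (cell_1.1 == cell_2.1) || (cell_1.2 == cell_2.2)

-- inner 'for cell_2, value_in_cage_2 in zip(...)' loop with its early 'return False'
def innerLoopA (cell_1 : Int × Int) (v1 : Int) : List ((Int × Int) × Int) → Bool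
  | [] => true
  | (cell_2, v2) :: rest =>
      if rowOrColSame cell_1 cell_2 && v1 == v2 then false
      else innerLoopA cell_1 v1 rest

-- outer 'for cell_1, value_in_cage_1 in zip(...)' loop
def outerLoopA (p2 : List ((Int × Int) × Int)) : List ((Int × Int) × Int) → Bool
  | [] => true
  | (cell_1, v1) :: rest =>
      if innerLoopA cell_1 v1 p2 then outerLoopA p2 rest else false

def constraints (cage_1 : List (Int × Int)) (values_of_cage_1 : List Int) (cage_2 : List (Int × Int)) (values_of_cage_2 : List Int) : Bool :=
  if cage_1 == cage_2 then true
  else outerLoopA (cage_2.zip values_of_cage_2) (cage_1.zip values_of_cage_1)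

-- ===== PORT B =====
-- one pass over a cage: key ('r', x, v) tagged true, ('c', y, v) tagged false
def cageKeys (pairs : List ((Int × Int) × Int)) : PySem.Set (Bool × Int × Int) :=
  pairs.foldl
    (fun s p => PySem.Set.add (PySem.Set.add s (true, p.1.1, p.2)) (false, p.1.2, p.2))
    PySem.Set.empty

-- B (alternative decomposition): tagged key-set disjointness instead of the nested pairwise scan
def constraints_alt (cage_1 : List (Int × Int)) (values_of_cage_1 : List Int) (cage_2 : List (Int × Int)) (values_of_cage_2 : List Int) : Bool :=
  if cage_1 == cage_2 then true
  else PySem.Set.isdisjoint (cageKeys (cage_1.zip values_of_cage_1)) (cageKeys (cage_2.zip values_of_cage_2))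

-- ===== PRECONDITION & SPEC =====
def Spec_constraints (cage_1 : List (Int × Int)) (values_of_cage_1 : List Int) (cage_2 : List (Int × Int)) (values_of_cage_2 : List Int) (out : Bool) : Prop := out = constraints_alt cage_1 values_of_cage_1 cage_2 values_of_cage_2
instance (cage_1 : List (Int × Int)) (values_of_cage_1 : List Int) (cage_2 : List (Int × Int)) (values_of_cage_2 : List Int) (out : Bool) : Decidable (Spec_constraints cage_1 values_of_cage_1 cage_2 values_of_cage_2 out) := by unfold Spec_constraints; infer_instance

-- ===== CLAIM (what is proved, stated in full; the proofs are below) =====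
def Claim_equal_constraints : Prop := ∀ (cage_1 : List (Int × Int)) (values_of_cage_1 : List Int) (cage_2 : List (Int × Int)) (values_of_cage_2 : List Int), Dom_constraints cage_1 values_of_cage_1 cage_2 values_of_cage_2 → Spec_constraints cage_1 values_of_cage_1 cage_2 values_of_cage_2 (constraints cage_1 values_of_cage_1 cage_2 values_of_cage_2)

-- ===== LEMMAS AND PROOFS =====
def keyOf1 (p : (Int × Int) × Int) : Bool × Int × Int := (true, p.1.1, p.2)
def keyOf2 (p : (Int × Int) × Int) : Bool × Int × Int := (false, p.1.2, p.2)

theorem mem_cageKeys_aux (pairs : List ((Int × Int) × Int)) (s : PySem.Set (Bool × Int × Int))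
    (k : Bool × Int × Int) :
    (k ∈ pairs.foldl (fun s p => PySem.Set.add (PySem.Set.add s (true, p.1.1, p.2)) (false, p.1.2, p.2)) s)
      ↔ k ∈ s ∨ ∃ p ∈ pairs, k = keyOf1 p ∨ k = keyOf2 p := by
  induction pairs generalizing s with
  | nil => simp
  | cons p rest ih =>
      simp only [List.foldl_cons, ih, PySem.Set.mem_add, List.mem_cons, keyOf1, keyOf2]
      constructor
      · rintro (((h|h)|h)|⟨q,hq,h⟩)
        · exact Or.inl h
        · exact Or.inr ⟨p, Or.inl rfl, Or.inl h⟩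
        · exact Or.inr ⟨p, Or.inl rfl, Or.inr h⟩
        · exact Or.inr ⟨q, Or.inr hq, h⟩
      · rintro (h|⟨q,(rfl|hq),h⟩)
        · exact Or.inl (Or.inl (Or.inl h))
        · rcases h with h|h
          · exact Or.inl (Or.inl (Or.inr h))
          · exact Or.inl (Or.inr h)
        · exact Or.inr ⟨q, hq, h⟩

theorem mem_cageKeys (pairs : List ((Int × Int) × Int)) (k : Bool × Int × Int) :
    k ∈ cageKeys pairs ↔ ∃ p ∈ pairs, k = keyOf1 p ∨ k = keyOf2 p := by
  simpa [PySem.Set.empty] using mem_cageKeys_aux pairs PySem.Set.empty k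

theorem innerLoopA_eq_true (c : Int × Int) (v : Int) (p2 : List ((Int × Int) × Int)) :
    innerLoopA c v p2 = true ↔
      ∀ q ∈ p2, ¬((c.1 = q.1.1 ∨ c.2 = q.1.2) ∧ v = q.2) := by
  induction p2 with
  | nil => simp [innerLoopA]
  | cons q rest ih =>
      obtain ⟨cq, vq⟩ := q
      simp only [innerLoopA, rowOrColSame]
      split_ifs with h
      · simp only [false_iff]
        intro hall
        simp only [Bool.and_eq_true, Bool.or_eq_true, beq_iff_eq] at h
        exact hall (cq, vq) (List.mem_cons_self ..) ⟨h.1, h.2⟩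
      · simp only [ih, List.mem_cons]
        constructor
        · rintro hall q' (rfl|hq') hc
          · exact h (by simp [Bool.and_eq_true, Bool.or_eq_true, beq_iff_eq]; tauto)
          · exact hall q' hq' hc
        · intro hall q' hq' hc
          exact hall q' (Or.inr hq') hc

theorem outerLoopA_eq_true (p2 p1 : List ((Int × Int) × Int)) :
    outerLoopA p2 p1 = true ↔
      ∀ p ∈ p1, ∀ q ∈ p2, ¬((p.1.1 = q.1.1 ∨ p.1.2 = q.1.2) ∧ p.2 = q.2) := by
  induction p1 with
  | nil => simp [outerLoopA]
  | cons p rest ih =>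
      obtain ⟨cp, vp⟩ := p
      simp only [outerLoopA, List.mem_cons]
      split_ifs with h
      · rw [ih]
        constructor
        · rintro hall q (rfl|hq)
          · exact (innerLoopA_eq_true cp vp p2).1 h
          · exact hall q hq
        · intro hall q hq
          exact hall q (Or.inr hq)
      · simp only [false_iff]
        intro hall
        exact h ((innerLoopA_eq_true cp vp p2).2 (fun q hq => hall (cp, vp) (Or.inl rfl) q hq))

theorem loops_eq_disjoint (p1 p2 : List ((Int × Int) × Int)) :
    outerLoopA p2 p1 = PySem.Set.isdisjoint (cageKeys p1) (cageKeys p2) := by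
  rw [Bool.eq_iff_iff, outerLoopA_eq_true, PySem.Set.isdisjoint_iff]
  constructor
  · intro hall k hk1 hk2
    rw [mem_cageKeys] at hk1 hk2
    obtain ⟨p, hp, hkp⟩ := hk1
    obtain ⟨q, hq, hkq⟩ := hk2
    refine hall p hp q hq ?_
    rcases hkp with rfl|rfl <;> rcases hkq with h|h <;>
      simp only [keyOf1, keyOf2, Prod.mk.injEq] at h <;> exact ⟨by tauto, by tauto⟩
  · intro hdisj p hp q hq hc
    rcases hc with ⟨hrc, hv⟩
    rcases hrc with hx|hy
    · exact hdisj (true, p.1.1, p.2) ((mem_cageKeys _ _).2 ⟨p, hp, Or.inl rfl⟩)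
        ((mem_cageKeys _ _).2 ⟨q, hq, Or.inl (by simp [keyOf1, hx, hv])⟩)
    · exact hdisj (false, p.1.2, p.2) ((mem_cageKeys _ _).2 ⟨p, hp, Or.inr rfl⟩)
        ((mem_cageKeys _ _).2 ⟨q, hq, Or.inr (by simp [keyOf2, hy, hv])⟩)

-- ===== VERDICT (by name: the statement is the Claim_ definition above) =====
theorem constraints_spec : Claim_equal_constraints := by
  intro c1 v1 c2 v2 _
  unfold Spec_constraints constraints constraints_alt
  split_ifs with h
  · rfl
  · exact loops_eq_disjoint (c1.zip v1) (c2.zip v2)
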